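-- pv_equiv track=rewrite | github.com/HagglesworthMD/TRANSFER-OPERATIONS | distributor.py | sanitize_completion_excerpt
-- ===== SOURCE A (Python) =====
-- COMPLETION_MAILTO_STRIP_SAFELINKS = True
--
-- COMPLETION_MAILTO_STRIP_DISCLAIMER = True
--
-- def sanitize_completion_excerpt(text):
--     if not text:
--         return ""
--     lines = text.splitlines()
--     out = []
--     blank_run = 0
--     for line in lines:
--         raw = line.strip()
--         lower = raw.lower()
--         if COMPLETION_MAILTO_STRIP_DISCLAIMER and "this email and any attachments are confidential" in lower:
--             break
--         if COMPLETION_MAILTO_STRIP_SAFELINKS and "safelinks.protection.outlook.com" in lower: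
--             continue
--         if lower.startswith("http://") or lower.startswith("https://"):
--             continue
--         if "<tel:" in lower or lower.startswith("tel:"):
--             continue
--         if raw == "":
--             blank_run += 1
--             if blank_run > 2:
--                 continue
--             out.append("")
--             continue
--         blank_run = 0
--         out.append(raw)
--     while out and out[0] == "":
--         out.pop(0)
--     while out and out[-1] == "":
--         out.pop()
--     return "\r\n".join(out)
-- ===== SOURCE B (Python) =====
-- def sanitize_completion_excerpt(text):
--     if not text:
--         return ""
--     # pass 1: keep stripped lines, stopping at the disclaimer, dropping link lines
--     kept = []
--     for line in text.splitlines():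
--         raw = line.strip()
--         low = raw.lower()
--         if "this email and any attachments are confidential" in low:
--             break
--         if ("safelinks.protection.outlook.com" in low
--                 or low.startswith("http://") or low.startswith("https://")
--                 or "<tel:" in low or low.startswith("tel:")):
--             continue
--         kept.append(raw)
--     # pass 2: drop every blank that follows two blanks (caps each blank run at 2)
--     prev1 = [None] + kept
--     prev2 = [None, None] + kept
--     collapsed = [s for s, p, q in zip(kept, prev1, prev2)
--                  if s != "" or p != "" or q != ""]
--     # trim leading and trailing blanks
--     collapsed = _drop_leading_blanks(collapsed)
--     collapsed = _drop_leading_blanks(collapsed[::-1])[::-1]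
--     return "\r\n".join(collapsed)
--
--
-- def _drop_leading_blanks(xs):
--     n = 0
--     while n < len(xs) and xs[n] == "":
--         n += 1
--     return xs[n:]
-- ===== Notes on version B (the rewrite author's own statement) =====
-- stated objective: alternative
-- what changed: Replaces A's single interleaved loop with its cross-line blank_run counter by three separate stateless passes: a pure filter pass (break at disclaimer, drop link lines), a zip-with-shifted-copies comprehension that drops any blank following two blanks, and a reverse-based trim of leading/trailing blanks.
import Mathlib
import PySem

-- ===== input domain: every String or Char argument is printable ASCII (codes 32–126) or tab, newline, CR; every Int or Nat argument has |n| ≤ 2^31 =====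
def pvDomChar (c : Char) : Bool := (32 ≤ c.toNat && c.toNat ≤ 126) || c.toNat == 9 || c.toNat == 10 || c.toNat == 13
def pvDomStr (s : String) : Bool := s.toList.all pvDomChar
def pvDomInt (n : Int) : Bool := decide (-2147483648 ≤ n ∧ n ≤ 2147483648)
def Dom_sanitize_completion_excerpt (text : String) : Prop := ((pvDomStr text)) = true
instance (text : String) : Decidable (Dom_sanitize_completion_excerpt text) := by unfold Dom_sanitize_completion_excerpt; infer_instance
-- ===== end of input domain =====

-- B replaces A's single loop (with its cross-line blank_run counter) by separate
-- filter / collapse-blanks / trim passes; same result, same cost (objective: alternative).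

-- ===== PORT A =====
def COMPLETION_MAILTO_STRIP_SAFELINKS : Bool := true
def COMPLETION_MAILTO_STRIP_DISCLAIMER : Bool := true

def saneLoopA : List String → List String → Int → List String
  | [], out, _ => out
  | line :: rest, out, blank_run =>
    let raw := PySem.Str.strip line
    let lower := PySem.Str.lower raw
    if COMPLETION_MAILTO_STRIP_DISCLAIMER && PySem.Str.isIn "this email and any attachments are confidential" lower then
      out
    else if COMPLETION_MAILTO_STRIP_SAFELINKS && PySem.Str.isIn "safelinks.protection.outlook.com" lower then
      saneLoopA rest out blank_run
    else if PySem.Str.startswith lower "http://" || PySem.Str.startswith lower "https://" then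
      saneLoopA rest out blank_run
    else if PySem.Str.isIn "<tel:" lower || PySem.Str.startswith lower "tel:" then
      saneLoopA rest out blank_run
    else if raw = "" then
      if blank_run + 1 > 2 then saneLoopA rest out (blank_run + 1)
      else saneLoopA rest (out ++ [""]) (blank_run + 1)
    else
      saneLoopA rest (out ++ [raw]) 0

-- while out and out[0] == "": out.pop(0)
def trimFrontA : List String → List String
  | [] => []
  | s :: rest => if s = "" then trimFrontA rest else s :: rest

-- while out and out[-1] == "": out.pop()
def trimBackA (xs : List String) : List String :=
  if _hL : xs.getLast? = some "" then trimBackA xs.dropLast else xs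
termination_by xs.length
decreasing_by
  have hne : xs ≠ [] := by intro e; subst e; simp at _hL
  have := List.length_pos_iff.mpr hne
  simp [List.length_dropLast]; omega

def sanitize_completion_excerpt (text : String) : String :=
  if text = "" then ""
  else
    let lines := PySem.Str.splitlines text
    let out := saneLoopA lines [] 0
    let out := trimFrontA out
    let out := trimBackA out
    PySem.Str.join "\r\n" out

-- ===== PORT B =====
-- pass 1: keep stripped lines, stopping at the disclaimer, dropping link lines
def filtB : List String → List String
  | [] => []
  | line :: rest =>
    let raw := PySem.Str.strip line
    let low := PySem.Str.lower raw
    if PySem.Str.isIn "this email and any attachments are confidential" low then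
      []
    else if PySem.Str.isIn "safelinks.protection.outlook.com" low
         || PySem.Str.startswith low "http://" || PySem.Str.startswith low "https://"
         || PySem.Str.isIn "<tel:" low || PySem.Str.startswith low "tel:" then
      filtB rest
    else
      raw :: filtB rest

-- pass 2: drop every blank that follows two blanks (caps each blank run at 2)
def collapseB (kept : List String) : List String :=
  let prev1 : List (Option String) := none :: kept.map some
  let prev2 : List (Option String) := none :: none :: kept.map some
  ((kept.zip prev1).zip prev2).filterMap
    (fun x => if x.1.1 ≠ "" ∨ x.1.2 ≠ some "" ∨ x.2 ≠ some "" then some x.1.1 else none)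

-- n = 0; while n < len(xs) and xs[n] == "": n += 1
def countLeadB : List String → Nat
  | [] => 0
  | s :: rest => if s = "" then countLeadB rest + 1 else 0

def dropLeadB (xs : List String) : List String := xs.drop (countLeadB xs)

def sanitize_completion_excerpt_alt (text : String) : String :=
  if text = "" then ""
  else
    let kept := filtB (PySem.Str.splitlines text)
    let collapsed := collapseB kept
    let collapsed := dropLeadB collapsed
    let collapsed := (dropLeadB collapsed.reverse).reverse
    PySem.Str.join "\r\n" collapsed

-- ===== PRECONDITION & SPEC =====
def Spec_sanitize_completion_excerpt (text : String) (out : String) : Prop := out = sanitize_completion_excerpt_alt text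
instance (text : String) (out : String) : Decidable (Spec_sanitize_completion_excerpt text out) := by unfold Spec_sanitize_completion_excerpt; infer_instance

-- ===== CLAIM (what is proved, stated in full; the proofs are below) =====
def Claim_equal_sanitize_completion_excerpt : Prop := ∀ (text : String), Dom_sanitize_completion_excerpt text → Spec_sanitize_completion_excerpt text (sanitize_completion_excerpt text)

-- ===== LEMMAS AND PROOFS =====

-- collapseB with generalised pads (the two Options are the last two kept entries, none at the start)
def auxC (kept : List String) (p q : Option String) : List String :=
  ((kept.zip (p :: kept.map some)).zip (q :: p :: kept.map some)).filterMap
    (fun x => if x.1.1 ≠ "" ∨ x.1.2 ≠ some "" ∨ x.2 ≠ some "" then some x.1.1 else none)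

lemma collapseB_eq_auxC (kept : List String) : collapseB kept = auxC kept none none := rfl

lemma auxC_nil (p q : Option String) : auxC [] p q = [] := rfl

lemma auxC_cons (s : String) (rest : List String) (p q : Option String) :
    auxC (s :: rest) p q =
      (if s ≠ "" ∨ p ≠ some "" ∨ q ≠ some "" then [s] else []) ++ auxC rest (some s) p := by
  simp only [auxC, List.map_cons, List.zip_cons_cons, List.filterMap_cons]
  split_ifs <;> simp

-- A's blank_run counter versus B's two look-back pads
def InvBR (br : Int) (p q : Option String) : Prop :=
  (br = 0 ∧ p ≠ some "") ∨ (br = 1 ∧ p = some "" ∧ q ≠ some "") ∨ (2 ≤ br ∧ p = some "" ∧ q = some "")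

lemma saneLoopA_eq_auxC (ls : List String) : ∀ (out : List String) (br : Int) (p q : Option String),
    InvBR br p q → saneLoopA ls out br = out ++ auxC (filtB ls) p q := by
  induction ls with
  | nil => intro out br p q _; simp [saneLoopA, filtB, auxC_nil]
  | cons line rest ih =>
    intro out br p q hinv
    simp only [saneLoopA, filtB, COMPLETION_MAILTO_STRIP_DISCLAIMER,
      COMPLETION_MAILTO_STRIP_SAFELINKS, Bool.true_and]
    set raw := PySem.Str.strip line with hraw
    set low := PySem.Str.lower raw with hlow
    by_cases h1 : PySem.Str.isIn "this email and any attachments are confidential" low = true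
    · simp only [h1, reduceIte, auxC_nil, List.append_nil]
    · rw [Bool.not_eq_true] at h1
      by_cases h2 : PySem.Str.isIn "safelinks.protection.outlook.com" low = true
      · simp only [h1, h2, Bool.true_or, Bool.false_eq_true, reduceIte]
        exact ih out br p q hinv
      · rw [Bool.not_eq_true] at h2
        by_cases h3 : PySem.Str.startswith low "http://" = true
        · simp only [h1, h2, h3, Bool.true_or, Bool.false_or, Bool.false_eq_true, reduceIte]
          exact ih out br p q hinv
        · rw [Bool.not_eq_true] at h3
          by_cases h4 : PySem.Str.startswith low "https://" = true
          · simp only [h1, h2, h3, h4, Bool.true_or, Bool.false_or, Bool.or_false,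
              Bool.false_eq_true, reduceIte]
            exact ih out br p q hinv
          · rw [Bool.not_eq_true] at h4
            by_cases h5 : PySem.Str.isIn "<tel:" low = true
            · simp only [h1, h2, h3, h4, h5, Bool.true_or, Bool.false_or, Bool.or_false,
                Bool.false_eq_true, reduceIte]
              exact ih out br p q hinv
            · rw [Bool.not_eq_true] at h5
              by_cases h6 : PySem.Str.startswith low "tel:" = true
              · simp only [h1, h2, h3, h4, h5, h6, Bool.false_or, Bool.or_false,
                  Bool.false_eq_true, reduceIte]
                exact ih out br p q hinv
              · rw [Bool.not_eq_true] at h6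
                simp only [h1, h2, h3, h4, h5, h6, Bool.false_or, Bool.or_false,
                  Bool.false_eq_true, reduceIte]
                by_cases hblank : raw = ""
                · rw [if_pos hblank, hblank, auxC_cons]
                  by_cases hbr : br + 1 > 2
                  · have hpq : p = some "" ∧ q = some "" := by
                      rcases hinv with ⟨h,_⟩|⟨h,_,_⟩|⟨_,hp,hq⟩ <;> first | omega | exact ⟨hp, hq⟩
                    have hinv2 : InvBR (br + 1) (some "") p := by
                      right; right
                      rcases hinv with ⟨h,_⟩|⟨h,_,_⟩|⟨h,hp,hq⟩ <;>
                        first | omega | exact ⟨by omega, rfl, hp⟩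
                    rw [if_pos hbr, if_neg (by simp [hpq.1, hpq.2]), List.nil_append,
                      ih out (br + 1) (some "") p hinv2]
                  · have hkeep : ("" : String) ≠ "" ∨ p ≠ some "" ∨ q ≠ some "" := by
                      rcases hinv with ⟨h,hp⟩|⟨h,hp,hq⟩|⟨h,_,_⟩
                      · exact Or.inr (Or.inl hp)
                      · exact Or.inr (Or.inr hq)
                      · omega
                    have hinv2 : InvBR (br + 1) (some "") p := by
                      rcases hinv with ⟨h,hp⟩|⟨h,hp,hq⟩|⟨h,_,_⟩
                      · right; left; exact ⟨by omega, rfl, hp⟩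
                      · right; right; exact ⟨by omega, rfl, hp⟩
                      · omega
                    rw [if_neg hbr, if_pos hkeep, ih (out ++ [""]) (br + 1) (some "") p hinv2,
                      List.singleton_append, List.append_assoc, List.singleton_append]
                · rw [if_neg hblank, auxC_cons, if_pos (Or.inl hblank),
                    ih (out ++ [raw]) 0 (some raw) p (Or.inl ⟨rfl, by simpa using hblank⟩),
                    List.singleton_append, List.append_assoc, List.singleton_append]

lemma trimFrontA_eq_dropLeadB (xs : List String) : trimFrontA xs = dropLeadB xs := by
  induction xs with
  | nil => rfl
  | cons s rest ih =>
    by_cases h : s = ""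
    · simp [trimFrontA, dropLeadB, countLeadB, h, ih, dropLeadB]
    · simp [trimFrontA, dropLeadB, countLeadB, h]

lemma trimBackA_eq (xs : List String) : trimBackA xs = (dropLeadB xs.reverse).reverse := by
  induction xs using List.reverseRecOn with
  | nil => rw [trimBackA]; rfl
  | append_singleton ys a ih =>
    rw [trimBackA]
    by_cases h : a = ""
    · subst h
      rw [dif_pos (by simp), List.dropLast_concat, ih]
      rw [← trimFrontA_eq_dropLeadB, ← trimFrontA_eq_dropLeadB]
      simp [trimFrontA]
    · rw [dif_neg (by simp [h])]
      rw [← trimFrontA_eq_dropLeadB]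
      simp [trimFrontA, h]

-- ===== VERDICT (by name: the statement is the Claim_ definition above) =====
theorem sanitize_completion_excerpt_spec : Claim_equal_sanitize_completion_excerpt := by
  intro text _
  unfold Spec_sanitize_completion_excerpt sanitize_completion_excerpt sanitize_completion_excerpt_alt
  by_cases h : text = ""
  · simp [h]
  · simp only [h]
    rw [saneLoopA_eq_auxC (PySem.Str.splitlines text) [] 0 none none (Or.inl ⟨rfl, by simp⟩)]
    rw [← collapseB_eq_auxC, trimFrontA_eq_dropLeadB, trimBackA_eq]
    simp
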